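-- pv_equiv track=rewrite | github.com/Raiferreira1/Estrutura-de-dados-exercicios | zeraPar.py | zeraPar
-- ===== SOURCE A (Python) =====
-- def zeraPar(n):
--     if n < 10 and n % 2 == 0:
--         return 0
--     elif n < 10 and n % 2 == 1:
--         return n
--     else:
--         if n % 2 == 0:
--             return zeraPar(n // 10) * 10
--         else:
--             return zeraPar(n // 10) * 10 + n % 10
-- ===== SOURCE B (Python) =====
-- def zeraPar(n):
--     if n < 10:
--         return 0 if n % 2 == 0 else n
--     result = 0
--     place = 1
--     while n >= 10:
--         digit = n % 10
--         if digit % 2 == 1: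
--             result += digit * place
--         place *= 10
--         n //= 10
--     if n % 2 == 1:
--         result += n * place
--     return result
-- ===== Notes on version B (the rewrite author's own statement) =====
-- stated objective: alternative
-- what changed: Replaces A's recursion (rebuilding the number on the way back up) with a single iterative while-loop that accumulates odd digits times their place value into a running result.
import Mathlib
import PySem

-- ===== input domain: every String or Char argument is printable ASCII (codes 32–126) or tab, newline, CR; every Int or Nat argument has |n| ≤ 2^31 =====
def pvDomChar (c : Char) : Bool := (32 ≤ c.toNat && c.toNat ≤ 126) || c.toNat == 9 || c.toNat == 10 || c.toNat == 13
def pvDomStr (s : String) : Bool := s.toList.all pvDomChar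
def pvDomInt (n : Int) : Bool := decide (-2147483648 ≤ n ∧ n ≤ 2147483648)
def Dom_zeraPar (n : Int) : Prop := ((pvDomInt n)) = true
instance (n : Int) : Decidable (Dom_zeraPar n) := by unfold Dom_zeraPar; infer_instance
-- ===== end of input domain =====

-- B replaces A's recursion with a single iterative loop accumulating odd digits times place values (alternative decomposition; return value only).

-- termination helper cited by both ports' decreasing_by
theorem pv_div10_lt (n : Int) (h : 10 ≤ n) :
    (PySem.Int.floordiv n 10).toNat < n.toNat := by
  rw [PySem.Int.floordiv_eq_ediv_of_pos (by norm_num)]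
  omega

-- ===== PORT A =====
def zeraPar (n : Int) : Int :=
  if n < 10 ∧ PySem.Int.mod n 2 = 0 then 0
  else if n < 10 ∧ PySem.Int.mod n 2 = 1 then n
  else
    if PySem.Int.mod n 2 = 0 then zeraPar (PySem.Int.floordiv n 10) * 10
    else zeraPar (PySem.Int.floordiv n 10) * 10 + PySem.Int.mod n 10
termination_by n.toNat
decreasing_by
  all_goals exact pv_div10_lt n (by
    have e2 : PySem.Int.mod n 2 = n % 2 := PySem.Int.mod_eq_emod_of_pos (by norm_num)
    simp only [e2] at *; omega)

-- ===== PORT B =====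
def zeraParLoop (n result place : Int) : Int :=
  if 10 ≤ n then
    let digit := PySem.Int.mod n 10
    zeraParLoop (PySem.Int.floordiv n 10)
      (if PySem.Int.mod digit 2 = 1 then result + digit * place else result)
      (place * 10)
  else
    if PySem.Int.mod n 2 = 1 then result + n * place else result
termination_by n.toNat
decreasing_by
  exact pv_div10_lt n (by assumption)

def zeraPar_alt (n : Int) : Int :=
  if n < 10 then (if PySem.Int.mod n 2 = 0 then 0 else n)
  else zeraParLoop n 0 1

-- ===== PRECONDITION & SPEC =====
def Spec_zeraPar (n : Int) (out : Int) : Prop := out = zeraPar_alt n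
instance (n : Int) (out : Int) : Decidable (Spec_zeraPar n out) := by unfold Spec_zeraPar; infer_instance

-- ===== CLAIM (what is proved, stated in full; the proofs are below) =====
def Claim_equal_zeraPar : Prop := ∀ (n : Int), Dom_zeraPar n → Spec_zeraPar n (zeraPar n)

-- ===== LEMMAS AND PROOFS =====

theorem zeraPar_small (n : Int) (h : n < 10) :
    zeraPar n = if PySem.Int.mod n 2 = 0 then 0 else n := by
  rw [zeraPar]
  have e2 : PySem.Int.mod n 2 = n % 2 := PySem.Int.mod_eq_emod_of_pos (by norm_num)
  simp only [e2]
  split_ifs <;> first | rfl | (exfalso; omega)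

theorem loop_small (n r p : Int) (h : n < 10) :
    zeraParLoop n r p = r + p * zeraPar n := by
  rw [zeraParLoop, zeraPar_small n h]
  have e2 : PySem.Int.mod n 2 = n % 2 := PySem.Int.mod_eq_emod_of_pos (by norm_num)
  simp only [e2, if_neg (show ¬ (10 : Int) ≤ n by omega)]
  rcases Int.emod_two_eq n with h2 | h2
  · rw [if_neg (by omega), if_pos h2]; ring
  · rw [if_pos h2, if_neg (by omega)]; ring

-- the loop invariant: the loop computes result + place * (A's value)
theorem loop_eq (k : Nat) : ∀ (n r p : Int), n.toNat ≤ k →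
    zeraParLoop n r p = r + p * zeraPar n := by
  induction k with
  | zero =>
    intro n r p h
    exact loop_small n r p (by omega)
  | succ k ih =>
    intro n r p h
    by_cases h10 : 10 ≤ n
    · have hlt := pv_div10_lt n h10
      have e2 : ∀ m : Int, PySem.Int.mod m 2 = m % 2 :=
        fun m => PySem.Int.mod_eq_emod_of_pos (by norm_num)
      have e10 : PySem.Int.mod n 10 = n % 10 := PySem.Int.mod_eq_emod_of_pos (by norm_num)
      have ed : PySem.Int.floordiv n 10 = n / 10 := PySem.Int.floordiv_eq_ediv_of_pos (by norm_num)
      rw [zeraParLoop, zeraPar]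
      simp only [e2, e10, ed, if_pos h10,
        if_neg (show ¬ (n < 10 ∧ n % 2 = 0) by omega),
        if_neg (show ¬ (n < 10 ∧ n % 2 = 1) by omega)]
      rw [ih _ _ _ (by rw [ed] at hlt; omega)]
      rcases Int.emod_two_eq n with h2 | h2
      · rw [if_neg (show ¬ n % 10 % 2 = 1 by omega), if_pos h2]; ring
      · rw [if_pos (show n % 10 % 2 = 1 by omega), if_neg (by omega)]; ring
    · exact loop_small n r p (by omega)

theorem zeraPar_eq_alt (n : Int) : zeraPar n = zeraPar_alt n := by
  unfold zeraPar_alt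
  by_cases h : n < 10
  · rw [zeraPar_small n h]; simp [h]
  · simp only [h, if_false]
    rw [loop_eq n.toNat n 0 1 le_rfl]
    ring

-- ===== VERDICT (by name: the statement is the Claim_ definition above) =====
theorem zeraPar_spec : Claim_equal_zeraPar := by
  intro n _
  unfold Spec_zeraPar
  exact zeraPar_eq_alt n
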